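-- pv_equiv track=rewrite | github.com/daniel-reich/ubiquitous-fiesta | C4nht9fQk7tN8mkPa_9.py | cannot_capture
-- ===== SOURCE A (Python) =====
-- def cannot_capture(board):
--   positions = []
--
--   for i in range(len(board)):
--     for j in range(len(board[i])):
--       if board[i][j] == 1:
--         positions.append((i,j))
--
--   for k in range(len(positions)):
--     for l in range(k+1, len(positions)):
--       delta_x_sqd = (positions[k][0] - positions[l][0])**2
--       delta_y_sqd = (positions[k][1] - positions[l][1])**2
--
--       if delta_x_sqd + delta_y_sqd == 5:
--         return False
--
--   return True
-- ===== SOURCE B (Python) =====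
-- def cannot_capture(board):
--   for i in range(len(board)):
--     for j in range(len(board[i])):
--       if board[i][j] == 1:
--         for di, dj in ((1, 2), (1, -2), (-1, 2), (-1, -2),
--                        (2, 1), (2, -1), (-2, 1), (-2, -1)):
--           ni, nj = i + di, j + dj
--           if 0 <= ni < len(board) and 0 <= nj < len(board[ni]) and board[ni][nj] == 1:
--             return False
--   return True
-- ===== Notes on version B (the rewrite author's own statement) =====
-- stated objective: alternative
-- what changed: B drops A's collect-positions-then-compare-all-pairs structure and instead does a single fused scan of the board, probing the 8 knight-offset cells directly (with per-row bounds checks) at each occupied cell.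
import Mathlib
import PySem

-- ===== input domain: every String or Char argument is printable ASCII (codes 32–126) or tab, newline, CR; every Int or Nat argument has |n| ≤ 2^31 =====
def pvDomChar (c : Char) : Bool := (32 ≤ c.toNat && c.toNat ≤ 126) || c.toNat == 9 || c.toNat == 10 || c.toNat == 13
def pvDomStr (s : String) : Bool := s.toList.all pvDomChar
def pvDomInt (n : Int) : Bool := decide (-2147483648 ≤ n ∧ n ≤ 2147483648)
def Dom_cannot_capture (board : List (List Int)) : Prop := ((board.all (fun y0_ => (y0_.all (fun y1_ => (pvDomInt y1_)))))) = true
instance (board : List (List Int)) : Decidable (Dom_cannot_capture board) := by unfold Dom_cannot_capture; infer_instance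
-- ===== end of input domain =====

-- B replaces A's collect-positions-then-all-pairs structure with one fused board scan probing
-- the 8 knight offsets at each occupied cell (objective: alternative; same observed behaviour).

-- ===== PORT A =====
-- positions-collection loops of A (for i / for j, append (i,j) when board[i][j] == 1)
def pvPositions (board : List (List Int)) : List (Int × Int) :=
  (PySem.List.enumerate board).foldl (fun acc p =>
    (PySem.List.enumerate p.2).foldl (fun acc2 q =>
      if q.2 == 1 then acc2 ++ [(p.1, q.1)] else acc2) acc) []

-- A's pairwise loop (k, l > k) with early 'return False'
def pvPairScan : List (Int × Int) → Bool
  | [] => true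
  | p :: rest =>
      if rest.any (fun q => (p.1 - q.1) ^ 2 + (p.2 - q.2) ^ 2 = 5) then false
      else pvPairScan rest

def cannot_capture (board : List (List Int)) : Bool :=
  pvPairScan (pvPositions board)

-- ===== PORT B =====
def pvKnightOffs : List (Int × Int) :=
  [(1, 2), (1, -2), (-1, 2), (-1, -2), (2, 1), (2, -1), (-2, 1), (-2, -1)]

-- B's inner loop over the 8 offsets, bounds-checking each neighbour
def pvProbe (board : List (List Int)) (i j : Int) : Bool :=
  pvKnightOffs.any (fun d =>
    decide (0 ≤ i + d.1) && decide (0 ≤ j + d.2) &&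
      (match PySem.List.pyGet? board (i + d.1) with
       | some row => PySem.List.pyGet? row (j + d.2) == some 1
       | none => false))

def cannot_capture_alt (board : List (List Int)) : Bool :=
  !((PySem.List.enumerate board).any (fun p =>
      (PySem.List.enumerate p.2).any (fun q =>
        q.2 == 1 && pvProbe board p.1 q.1)))

-- ===== PRECONDITION & SPEC =====
def Spec_cannot_capture (board : List (List Int)) (out : Bool) : Prop := out = cannot_capture_alt board
instance (board : List (List Int)) (out : Bool) : Decidable (Spec_cannot_capture board out) := by unfold Spec_cannot_capture; infer_instance

-- ===== CLAIM (what is proved, stated in full; the proofs are below) =====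
def Claim_equal_cannot_capture : Prop := ∀ (board : List (List Int)), Dom_cannot_capture board → Spec_cannot_capture board (cannot_capture board)

-- ===== LEMMAS AND PROOFS =====

-- cell (i, j) of the board holds a 1 (nonnegative indices, per-row length)
def pvOcc (board : List (List Int)) (i j : Int) : Prop :=
  0 ≤ i ∧ 0 ≤ j ∧ ∃ row, PySem.List.pyGet? board i = some row ∧ PySem.List.pyGet? row j = some 1

-- the knight relation as both programs test it
def pvK (p q : Int × Int) : Prop := (p.1 - q.1) ^ 2 + (p.2 - q.2) ^ 2 = 5

lemma pvK_symm {p q : Int × Int} (h : pvK p q) : pvK q p := by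
  unfold pvK at *; ring_nf at *; linarith

lemma pvK_irrefl (p : Int × Int) : ¬ pvK p p := by
  unfold pvK; simp

-- the integer solutions of x² + y² = 5 are exactly the 8 knight offsets
lemma pv_knight_mem (x y : Int) : x ^ 2 + y ^ 2 = 5 ↔ (x, y) ∈ pvKnightOffs := by
  constructor
  · intro h
    have hx1 : -2 ≤ x := by nlinarith
    have hx2 : x ≤ 2 := by nlinarith
    have hy1 : -2 ≤ y := by nlinarith
    have hy2 : y ≤ 2 := by nlinarith
    interval_cases x <;> interval_cases y <;> simp_all [pvKnightOffs]
  · intro h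
    simp [pvKnightOffs] at h
    rcases h with ⟨hx, hy⟩ | ⟨hx, hy⟩ | ⟨hx, hy⟩ | ⟨hx, hy⟩ | ⟨hx, hy⟩ | ⟨hx, hy⟩ | ⟨hx, hy⟩ | ⟨hx, hy⟩ <;>
      subst hx <;> subst hy <;> norm_num

-- A's nested collection loops build exactly the filtered flat map of the board
lemma pvPositions_eq (board : List (List Int)) :
    pvPositions board =
      (PySem.List.enumerate board).flatMap (fun p =>
        ((PySem.List.enumerate p.2).filter (fun q => q.2 == 1)).map (fun q => (p.1, q.1))) := by
  unfold pvPositions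
  have hfun : (fun (acc : List (Int × Int)) (p : Int × List Int) =>
        List.foldl (fun acc2 q => if q.2 == 1 then acc2 ++ [(p.1, q.1)] else acc2) acc
          (PySem.List.enumerate p.2)) =
      fun acc p => acc ++ ((PySem.List.enumerate p.2).filter (fun q => q.2 == 1)).map (fun q => (p.1, q.1)) :=
    funext fun acc => funext fun p => PySem.List.foldl_append_if _ _ _ _
  rw [hfun, PySem.List.foldl_append_eq_flatMap]
  simp

-- membership in A's positions list is exactly occupancy
lemma pv_mem_positions (board : List (List Int)) (i j : Int) :
    (i, j) ∈ pvPositions board ↔ pvOcc board i j := by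
  rw [pvPositions_eq]
  simp only [List.mem_flatMap, List.mem_map, List.mem_filter,
    PySem.List.mem_enumerate_iff, beq_iff_eq, zero_add]
  constructor
  · rintro ⟨p, ⟨k, hk, rfl⟩, q, ⟨⟨m, hm, rfl⟩, h1⟩, heq⟩
    simp only at h1 heq hm
    injection heq with hi hj
    subst hi; subst hj
    refine ⟨by omega, by omega, board[k], ?_, ?_⟩
    · simp [PySem.List.pyGet?_natCast, List.getElem?_eq_getElem hk]
    · simp [PySem.List.pyGet?_natCast]
      rw [List.getElem?_eq_getElem hm]
      exact congrArg some h1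
  · rintro ⟨hi, hj, row, hrow, hcell⟩
    obtain ⟨k, rfl⟩ : ∃ k : Nat, i = (k : Int) := ⟨i.toNat, by omega⟩
    obtain ⟨m, rfl⟩ : ∃ m : Nat, j = (m : Int) := ⟨j.toNat, by omega⟩
    rw [PySem.List.pyGet?_natCast] at hrow hcell
    obtain ⟨hkl, hrow'⟩ := List.getElem?_eq_some_iff.mp hrow
    obtain ⟨hml, hcell'⟩ := List.getElem?_eq_some_iff.mp hcell
    refine ⟨(↑k, board[k]), ⟨k, hkl, rfl⟩, (↑m, board[k][m]'(by rw [hrow']; exact hml)), ⟨⟨m, ?_, rfl⟩, ?_⟩, rfl⟩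
    · rw [hrow']; exact hml
    · simp only
      have : board[k][m]'(by rw [hrow']; exact hml) = row[m] := by
        congr 1
      rw [this, hcell']

-- A's early-return pair loop is 'no knight pair anywhere in the list'
lemma pv_pairScan_true_iff (ps : List (Int × Int)) :
    pvPairScan ps = true ↔ ∀ p ∈ ps, ∀ q ∈ ps, ¬ pvK p q := by
  induction ps with
  | nil => simp [pvPairScan]
  | cons p rest ih =>
    unfold pvPairScan
    by_cases h : rest.any (fun q => (p.1 - q.1) ^ 2 + (p.2 - q.2) ^ 2 = 5)
    · simp only [h, if_true]
      constructor
      · intro hc; exact absurd hc (by simp)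
      · intro hall
        simp only [List.any_eq_true, decide_eq_true_eq] at h
        rcases h with ⟨q, hq, hk⟩
        exact absurd hk (hall p List.mem_cons_self q (List.mem_cons_of_mem _ hq))
    · simp only [h, if_false, Bool.false_eq_true]
      rw [ih]
      simp only [List.any_eq_true, decide_eq_true_eq, not_exists] at h
      push_neg at h
      constructor
      · intro hrest a ha b hb
        rcases List.mem_cons.mp ha with he | ha' <;> rcases List.mem_cons.mp hb with he2 | hb'
        · rw [he, he2]; exact pvK_irrefl p
        · rw [he]; exact h b hb'
        · rw [he2]; intro hk; exact h a ha' (pvK_symm hk)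
        · exact hrest a ha' b hb'
      · intro hall a ha b hb
        exact hall a (List.mem_cons_of_mem _ ha) b (List.mem_cons_of_mem _ hb)

-- B's per-cell probe finds exactly the occupied knight neighbours
lemma pv_probe_true_iff (board : List (List Int)) (i j : Int) :
    pvProbe board i j = true ↔ ∃ i' j', pvOcc board i' j' ∧ pvK (i, j) (i', j') := by
  unfold pvProbe
  simp only [List.any_eq_true, Bool.and_eq_true, decide_eq_true_eq]
  constructor
  · rintro ⟨d, hd, ⟨hni, hnj⟩, hm⟩
    split at hm
    case h_2 => exact absurd hm (by simp)
    case h_1 row heq =>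
      refine ⟨i + d.1, j + d.2, ⟨hni, hnj, row, heq, by simpa using hm⟩, ?_⟩
      unfold pvK
      have := (pv_knight_mem d.1 d.2).mpr (by cases d; exact hd)
      simp only
      nlinarith [this]
  · rintro ⟨i', j', ⟨hi', hj', row, hrow, hcell⟩, hk⟩
    refine ⟨(i' - i, j' - j), ?_, ⟨?_, ?_⟩, ?_⟩
    · rw [← pv_knight_mem]
      unfold pvK at hk
      nlinarith [hk]
    · simpa using hi'
    · simpa using hj'
    · have h1 : i + (i' - i) = i' := by ring
      have h2 : j + (j' - j) = j' := by ring
      simp only [h1, h2, hrow, hcell]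
      simp

-- the double scan of B finds an occupied cell with probe true, iff one exists
lemma pv_alt_true_iff (board : List (List Int)) :
    cannot_capture_alt board = true ↔
      ∀ i j, pvOcc board i j → pvProbe board i j = false := by
  unfold cannot_capture_alt
  rw [Bool.not_eq_eq_eq_not, Bool.not_true, ← Bool.not_eq_true]
  simp only [List.any_eq_true, Bool.and_eq_true, beq_iff_eq, not_exists,
    PySem.List.mem_enumerate_iff, zero_add]
  constructor
  · intro h i j hocc
    rcases hocc with ⟨hi, hj, row, hrow, hcell⟩
    obtain ⟨k, rfl⟩ : ∃ k : Nat, i = (k : Int) := ⟨i.toNat, by omega⟩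
    obtain ⟨m, rfl⟩ : ∃ m : Nat, j = (m : Int) := ⟨j.toNat, by omega⟩
    rw [PySem.List.pyGet?_natCast] at hrow hcell
    obtain ⟨hkl, hrow'⟩ := List.getElem?_eq_some_iff.mp hrow
    obtain ⟨hml, hcell'⟩ := List.getElem?_eq_some_iff.mp hcell
    have hml' : m < board[k].length := by rw [hrow']; exact hml
    have h1 := h ((k : Int), board[k])
    rw [Bool.eq_false_iff]
    intro hprobe
    refine h1 ⟨⟨k, hkl, rfl⟩, ((m : Int), board[k][m]'hml'), ⟨m, hml', rfl⟩, ?_, hprobe⟩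
    have : board[k][m]'hml' = row[m] := by congr 1
    rw [this, hcell']
  · rintro h p ⟨⟨k, hkl, rfl⟩, q, ⟨m, hml, rfl⟩, hq1, hprobe⟩
    simp only at hq1 hprobe
    have hocc : pvOcc board (k : Int) (m : Int) := by
      refine ⟨by omega, by omega, board[k], ?_, ?_⟩
      · simp [PySem.List.pyGet?_natCast, List.getElem?_eq_getElem hkl]
      · simp [PySem.List.pyGet?_natCast]
        rw [List.getElem?_eq_getElem hml]
        exact congrArg some hq1
    rw [h _ _ hocc] at hprobe
    exact Bool.false_ne_true hprobe

-- ===== VERDICT (by name: the statement is the Claim_ definition above) =====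
theorem cannot_capture_spec : Claim_equal_cannot_capture := by
  intro board _
  unfold Spec_cannot_capture
  have hA : cannot_capture board = true ↔
      ∀ i j, pvOcc board i j → ∀ i' j', pvOcc board i' j' → ¬ pvK (i, j) (i', j') := by
    unfold cannot_capture
    rw [pv_pairScan_true_iff]
    constructor
    · intro h i j hocc i' j' hocc'
      exact h (i, j) ((pv_mem_positions board i j).mpr hocc)
              (i', j') ((pv_mem_positions board i' j').mpr hocc')
    · intro h p hp q hq
      exact h p.1 p.2 ((pv_mem_positions board p.1 p.2).mp hp)
              q.1 q.2 ((pv_mem_positions board q.1 q.2).mp hq)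
  have hB : cannot_capture_alt board = true ↔
      ∀ i j, pvOcc board i j → ∀ i' j', pvOcc board i' j' → ¬ pvK (i, j) (i', j') := by
    rw [pv_alt_true_iff]
    constructor
    · intro h i j hocc i' j' hocc' hk
      have := h i j hocc
      have hp : pvProbe board i j = true := (pv_probe_true_iff board i j).mpr ⟨i', j', hocc', hk⟩
      rw [this] at hp; exact Bool.false_ne_true hp
    · intro h i j hocc
      rw [Bool.eq_false_iff]
      intro hp
      rcases (pv_probe_true_iff board i j).mp hp with ⟨i', j', hocc', hk⟩
      exact h i j hocc i' j' hocc' hk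
  have hiff := hA.trans hB.symm
  cases h1 : cannot_capture board <;> cases h2 : cannot_capture_alt board <;> simp_all
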